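-- pv_equiv track=rewrite | github.com/mengsince1986/coding_bat_python | warmup-2/array123.py | array123
-- ===== SOURCE A (Python) =====
-- def array123(nums):
--     """
--     Given an array of ints, return True if the sequence of numbers 1, 2, 3
--     appears in the array somewhere.
--
--     >>> array123([1, 1, 2, 3, 1])
--     True
--     >>> array123([1, 1, 2, 4, 1])
--     False
--     >>> array123([1, 1, 2, 1, 2, 3])
--     True
--     """
--     found_123 = False
--     i = 0
--     while not found_123 and i + 2 < len(nums):
--         if nums[i] == 1 and nums[i+1] == 2 and nums[i+2] == 3:
--             found_123 = True
--         i += 1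
--     return found_123
-- ===== SOURCE B (Python) =====
-- def array123(nums):
--     """Single-pass state machine: state = number of 1,2,3 matched consecutively."""
--     state = 0
--     for n in nums:
--         if state == 2 and n == 3:
--             return True
--         elif state == 1 and n == 2:
--             state = 2
--         else:
--             state = 1 if n == 1 else 0
--     return False
-- ===== Notes on version B (the rewrite author's own statement) =====
-- stated objective: idiomatic
-- what changed: Replaced the indexed sliding-window while-loop (found flag plus three nums[i..i+2] index lookups per position) by a single forward scan over the elements keeping an integer match-progress state.
import Mathlib
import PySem

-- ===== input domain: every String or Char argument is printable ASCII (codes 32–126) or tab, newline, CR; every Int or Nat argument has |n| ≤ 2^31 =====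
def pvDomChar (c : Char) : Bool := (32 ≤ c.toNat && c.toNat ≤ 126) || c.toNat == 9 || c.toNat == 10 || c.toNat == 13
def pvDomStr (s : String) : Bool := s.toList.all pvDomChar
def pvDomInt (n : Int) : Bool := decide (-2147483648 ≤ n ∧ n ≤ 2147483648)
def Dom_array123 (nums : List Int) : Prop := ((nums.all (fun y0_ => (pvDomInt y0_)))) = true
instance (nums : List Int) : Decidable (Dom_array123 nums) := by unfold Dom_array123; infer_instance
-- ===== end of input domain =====

-- B replaces A's indexed sliding-window lookahead with a single forward-scan state machine (idiomatic single pass).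

-- ===== PORT A =====
-- the while loop of A: found flag, index i, window test nums[i], nums[i+1], nums[i+2]
def array123Loop (nums : List Int) (found : Bool) (i : Nat) : Bool :=
  if ¬ found = true ∧ i + 2 < nums.length then
    array123Loop nums
      (if PySem.List.pyGet? nums (i : Int) = some 1 ∧
          PySem.List.pyGet? nums ((i : Int) + 1) = some 2 ∧
          PySem.List.pyGet? nums ((i : Int) + 2) = some 3 then true else found)
      (i + 1)
  else found
termination_by nums.length - i
decreasing_by omega

def array123 (nums : List Int) : Bool := array123Loop nums false 0

-- ===== PORT B =====
-- state ∈ {0,1,2}: how many of 1,2,3 have been matched consecutively just before the cursor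
def array123AltLoop (state : Int) (xs : List Int) : Bool :=
  match xs with
  | [] => false
  | n :: rest =>
    if state = 2 ∧ n = 3 then true
    else if state = 1 ∧ n = 2 then array123AltLoop 2 rest
    else array123AltLoop (if n = 1 then 1 else 0) rest

def array123_alt (nums : List Int) : Bool := array123AltLoop 0 nums

-- ===== PRECONDITION & SPEC =====
def Spec_array123 (nums : List Int) (out : Bool) : Prop := out = array123_alt nums
instance (nums : List Int) (out : Bool) : Decidable (Spec_array123 nums out) := by unfold Spec_array123; infer_instance

-- ===== CLAIM (what is proved, stated in full; the proofs are below) =====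
def Claim_equal_array123 : Prop := ∀ (nums : List Int), Dom_array123 nums → Spec_array123 nums (array123 nums)

-- ===== LEMMAS AND PROOFS =====

-- reference window checker: both loops are proved equal to it
def wcheck : List Int → Bool
  | a :: b :: c :: r => (a = 1 && b = 2 && c = 3) || wcheck (b :: c :: r)
  | _ => false

theorem array123Loop_found (nums : List Int) (i : Nat) :
    array123Loop nums true i = true := by
  unfold array123Loop; simp

theorem wcheck_short (xs : List Int) (h : xs.length < 3) : wcheck xs = false := by
  match xs with
  | [] => rfl
  | [_] => rfl
  | [_, _] => rfl
  | _ :: _ :: _ :: _ => simp at h; omega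

theorem array123Loop_eq_wcheck (nums : List Int) (i : Nat) :
    array123Loop nums false i = wcheck (nums.drop i) := by
  by_cases h : i + 2 < nums.length
  · have h0 : i < nums.length := by omega
    have h1 : i + 1 < nums.length := by omega
    have hd0 : nums.drop i = nums[i] :: nums.drop (i + 1) :=
      List.drop_eq_getElem_cons h0
    have hd1 : nums.drop (i + 1) = nums[i+1] :: nums.drop (i + 2) :=
      List.drop_eq_getElem_cons h1
    have hd2 : nums.drop (i + 2) = nums[i+2] :: nums.drop (i + 3) :=
      List.drop_eq_getElem_cons h
    have g0 : PySem.List.pyGet? nums (i : Int) = some nums[i] :=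
      PySem.List.pyGet?_ofNat nums i h0
    have g1 : PySem.List.pyGet? nums ((i : Int) + 1) = some nums[i+1] := by
      have := PySem.List.pyGet?_ofNat nums (i+1) h1
      rw [← this]; norm_num
    have g2 : PySem.List.pyGet? nums ((i : Int) + 2) = some nums[i+2] := by
      have := PySem.List.pyGet?_ofNat nums (i+2) h
      rw [← this]; norm_num
    rw [hd0, hd1, hd2]
    unfold array123Loop
    rw [if_pos (by simp [h]), g0, g1, g2]
    by_cases hm : nums[i] = 1 ∧ nums[i+1] = 2 ∧ nums[i+2] = 3
    · rw [if_pos (by simp [hm.1, hm.2.1, hm.2.2]), array123Loop_found]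
      unfold wcheck
      simp [hm.1, hm.2.1, hm.2.2]
    · rw [if_neg (by simpa using hm)]
      have ih := array123Loop_eq_wcheck nums (i + 1)
      rw [ih, hd1, hd2]
      conv_rhs => rw [wcheck]
      have : (nums[i] = (1:Int) && nums[i+1] = 2 && nums[i+2] = 3) = false := by
        rcases not_and_or.1 hm with h' | h'
        · simp [h']
        rcases not_and_or.1 h' with h'' | h''
        · simp [h'']
        · simp [h'']
      rw [this]
      simp
  · unfold array123Loop
    rw [if_neg (by simp [h])]
    rw [wcheck_short]
    have := List.length_drop (l := nums) (i := i)
    omega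
termination_by nums.length - i
decreasing_by omega

theorem alt_eq_wcheck (xs : List Int) :
    array123AltLoop 0 xs = wcheck xs ∧
    array123AltLoop 1 xs = wcheck (1 :: xs) ∧
    array123AltLoop 2 xs = wcheck (1 :: 2 :: xs) := by
  induction xs with
  | nil => refine ⟨rfl, rfl, rfl⟩
  | cons n r ih =>
    obtain ⟨ih0, ih1, ih2⟩ := ih
    refine ⟨?_, ?_, ?_⟩
    · show array123AltLoop 0 (n :: r) = wcheck (n :: r)
      unfold array123AltLoop
      rw [if_neg (by simp), if_neg (by simp)]
      by_cases hn : n = 1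
      · subst hn
        rw [if_pos rfl, ih1]
      · rw [if_neg hn, ih0]
        match r with
        | [] => simp [wcheck_short]
        | [b] => simp [wcheck_short]
        | b :: c :: r' =>
          conv_rhs => rw [wcheck]
          simp [hn]
    · show array123AltLoop 1 (n :: r) = wcheck (1 :: n :: r)
      unfold array123AltLoop
      rw [if_neg (by simp)]
      by_cases hn : n = 2
      · subst hn
        rw [if_pos (by simp), ih2]
      · rw [if_neg (by simp [hn])]
        have hrec : array123AltLoop (if n = 1 then 1 else 0) r = wcheck (n :: r) := by
          by_cases h1 : n = 1
          · subst h1; rw [if_pos rfl, ih1]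
          · rw [if_neg h1, ih0]
            match r with
            | [] => simp [wcheck_short]
            | [b] => simp [wcheck_short]
            | b :: c :: r' =>
              conv_rhs => rw [wcheck]
              simp [h1]
        rw [hrec]
        match r with
        | [] => simp [wcheck_short]
        | b :: r' =>
          conv_rhs => rw [wcheck]
          simp [hn]
    · show array123AltLoop 2 (n :: r) = wcheck (1 :: 2 :: n :: r)
      unfold array123AltLoop
      conv_rhs => rw [wcheck]
      by_cases hn : n = 3
      · subst hn
        rw [if_pos (by simp)]
        simp
      · rw [if_neg (by simp [hn]), if_neg (by simp)]
        have hrec : array123AltLoop (if n = 1 then 1 else 0) r = wcheck (n :: r) := by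
          by_cases h1 : n = 1
          · subst h1; rw [if_pos rfl, ih1]
          · rw [if_neg h1, ih0]
            match r with
            | [] => simp [wcheck_short]
            | [b] => simp [wcheck_short]
            | b :: c :: r' =>
              conv_rhs => rw [wcheck]
              simp [h1]
        rw [hrec]
        have : wcheck (2 :: n :: r) = wcheck (n :: r) := by
          match r with
          | [] => simp [wcheck_short]
          | b :: r' =>
            conv_lhs => rw [wcheck]
            simp
        simp [hn, this]

-- ===== VERDICT (by name: the statement is the Claim_ definition above) =====
theorem array123_spec : Claim_equal_array123 := by
  intro nums _
  show array123 nums = array123_alt nums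
  unfold array123 array123_alt
  rw [array123Loop_eq_wcheck, (alt_eq_wcheck nums).1, List.drop_zero]
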